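-- pv_equiv track=rewrite | github.com/Jerempire/gym-anything | benchmarks/cua_world/environments/libreoffice_calc_env/tasks/meal_train_coordinator/verifier.py | check_duplicate_detection
-- ===== SOURCE A (Python) =====
-- from typing import Dict, Any, Tuple, List
--
-- def find_formulas_in_row(row: List[Dict], keywords: List[str]) -> Tuple[bool, str]:
--     """
--     Search for formulas in a row that contain specific keywords.
--
--     Args:
--         row: List of cell dictionaries
--         keywords: List of keywords to search for in formulas (case-insensitive)
--
--     Returns:
--         Tuple of (found, formula_text)
--     """
--     for cell in row:
--         if not isinstance(cell, dict):
--             continue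
--
--         formula = cell.get('formula', '')
--         if not formula:
--             continue
--
--         formula_upper = formula.upper()
--         for keyword in keywords:
--             if keyword.upper() in formula_upper:
--                 return True, formula
--
--     return False, ""
--
-- def find_formulas_in_sheet(sheet_rows: List[List], keywords: List[str], max_rows: int = 30) -> Tuple[bool, List[str]]:
--     """
--     Search entire sheet for formulas containing keywords.
--
--     Args:
--         sheet_rows: List of rows from sheet
--         keywords: Keywords to search for
--         max_rows: Maximum number of rows to check
--
--     Returns:
--         Tuple of (found, list_of_formulas)
--     """
--     found_formulas = []
--
--     for row_idx, row in enumerate(sheet_rows[:max_rows]):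
--         found, formula = find_formulas_in_row(row, keywords)
--         if found:
--             found_formulas.append(formula)
--
--     return len(found_formulas) > 0, found_formulas
--
-- def check_duplicate_detection(sheet_rows: List[List]) -> Tuple[bool, str]:
--     """
--     Check if duplicate detection formula exists.
--     Should flag the duplicate April 12 entries.
--     """
--     # Look for COUNTIF formulas
--     found, formulas = find_formulas_in_sheet(sheet_rows, ['COUNTIF'], max_rows=25)
--
--     if found:
--         # Check if any cell has "DUPLICATE" or warning indicators
--         for row in sheet_rows[:25]:
--             for cell in row:
--                 if not isinstance(cell, dict):
--                     continue
--                 value = str(cell.get('value', '')).upper()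
--                 if any(indicator in value for indicator in ['DUPLICATE', 'DUP', '⚠', 'WARNING']):
--                     return True, f"Duplicate detection working (found flag: {value})"
--
--         return True, "COUNTIF formula found but may not be flagging duplicates"
--
--     return False, "No duplicate detection formula found"
-- ===== SOURCE B (Python) =====
-- def check_duplicate_detection(sheet_rows):
--     """
--     Check if duplicate detection formula exists.
--     Single pass over the first 25 rows: track whether any COUNTIF formula
--     was seen and capture the first duplicate-flag cell value (set once).
--     """
--     has_countif = False
--     first_flag = None
--     for row in sheet_rows[:25]:
--         for cell in row:
--             if not isinstance(cell, dict):
--                 continue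
--             if 'COUNTIF' in cell.get('formula', '').upper():
--                 has_countif = True
--             if first_flag is None:
--                 value = str(cell.get('value', '')).upper()
--                 if any(ind in value for ind in ('DUPLICATE', 'DUP', '⚠', 'WARNING')):
--                     first_flag = value
--     if not has_countif:
--         return False, "No duplicate detection formula found"
--     if first_flag is not None:
--         return True, f"Duplicate detection working (found flag: {first_flag})"
--     return True, "COUNTIF formula found but may not be flagging duplicates"
-- ===== Notes on version B (the rewrite author's own statement) =====
-- stated objective: simpler
-- what changed: Inlines both helpers and replaces A's two separate scans of the first 25 rows (one fold collecting all matching formulas, then a second nested scan for a flag value) with a single pass that maintains one boolean and the first flag value, branching once at the end.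
import Mathlib
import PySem

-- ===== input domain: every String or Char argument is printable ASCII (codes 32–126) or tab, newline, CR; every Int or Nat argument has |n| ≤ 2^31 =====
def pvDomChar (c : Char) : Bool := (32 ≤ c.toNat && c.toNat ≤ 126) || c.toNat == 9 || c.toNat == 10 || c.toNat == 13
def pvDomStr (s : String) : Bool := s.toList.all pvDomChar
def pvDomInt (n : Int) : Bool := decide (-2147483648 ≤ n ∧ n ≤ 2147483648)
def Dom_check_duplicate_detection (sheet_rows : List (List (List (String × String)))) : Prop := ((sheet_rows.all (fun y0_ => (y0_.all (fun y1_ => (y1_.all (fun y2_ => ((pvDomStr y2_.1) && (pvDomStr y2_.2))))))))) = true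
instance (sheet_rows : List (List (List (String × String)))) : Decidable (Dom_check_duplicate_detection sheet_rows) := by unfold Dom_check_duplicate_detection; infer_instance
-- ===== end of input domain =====

-- B inlines A's two helpers and replaces A's two scans of sheet_rows[:25] with one
-- pass maintaining a COUNTIF boolean and the first flag value (objective: simpler).
-- All cells are dicts under the type convention, so Python's isinstance skip is vacuous.

-- ===== PORT A =====
-- find_formulas_in_row: for cell in row → structural recursion; the inner
-- 'for keyword in keywords: if …: return' is the first-match scan List.find?.
def find_formulas_in_row (row : List (List (String × String))) (keywords : List String) : Bool × String :=
  match row with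
  | [] => (false, "")
  | cell :: rest =>
    let formula := PySem.Dict.getD ⟨cell⟩ "formula" ""
    if formula = "" then find_formulas_in_row rest keywords
    else
      let formula_upper := PySem.Str.upper formula
      match keywords.find? (fun keyword => PySem.Str.isIn (PySem.Str.upper keyword) formula_upper) with
      | some _ => (true, formula)
      | none => find_formulas_in_row rest keywords

def find_formulas_in_sheet (sheet_rows : List (List (List (String × String)))) (keywords : List String) (max_rows : Int) : Bool × List String :=
  let found_formulas :=
    (PySem.List.slice sheet_rows none (some max_rows)).foldl
      (fun acc row =>
        let fr := find_formulas_in_row row keywords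
        if fr.1 then acc ++ [fr.2] else acc) []
  (decide (found_formulas.length > 0), found_formulas)

-- the nested 'for row … for cell … return' flag scan: first match over rows, first match in a row
def check_duplicate_detection (sheet_rows : List (List (List (String × String)))) : Bool × String :=
  let fs := find_formulas_in_sheet sheet_rows ["COUNTIF"] 25
  if fs.1 then
    match (PySem.List.slice sheet_rows none (some 25)).findSome?
        (fun row => row.findSome? (fun cell =>
          let value := PySem.Str.upper (PySem.Dict.getD ⟨cell⟩ "value" "")
          if ["DUPLICATE", "DUP", "⚠", "WARNING"].any (fun indicator => PySem.Str.isIn indicator value)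
          then some value else none)) with
    | some value => (true, "Duplicate detection working (found flag: " ++ value ++ ")")
    | none => (true, "COUNTIF formula found but may not be flagging duplicates")
  else (false, "No duplicate detection formula found")

-- ===== PORT B =====
-- single pass: state (has_countif, first_flag); bStep is the loop body for one cell,
-- bRow the inner 'for cell in row' loop (first_flag is set at most once)
def bStep (st : Bool × Option String) (cell : List (String × String)) : Bool × Option String :=
  let st1 := if PySem.Str.isIn "COUNTIF" (PySem.Str.upper (PySem.Dict.getD ⟨cell⟩ "formula" ""))
             then (true, st.2) else st
  match st1.2 with
  | some _ => st1
  | none =>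
    let value := PySem.Str.upper (PySem.Dict.getD ⟨cell⟩ "value" "")
    if ["DUPLICATE", "DUP", "⚠", "WARNING"].any (fun ind => PySem.Str.isIn ind value)
    then (st1.1, some value) else st1

def bRow (st : Bool × Option String) (row : List (List (String × String))) : Bool × Option String :=
  row.foldl bStep st

def check_duplicate_detection_alt (sheet_rows : List (List (List (String × String)))) : Bool × String :=
  let st := (PySem.List.slice sheet_rows none (some 25)).foldl bRow (false, none)
  if !st.1 then (false, "No duplicate detection formula found")
  else
    match st.2 with
    | some value => (true, "Duplicate detection working (found flag: " ++ value ++ ")")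
    | none => (true, "COUNTIF formula found but may not be flagging duplicates")

-- ===== PRECONDITION & SPEC =====
def Spec_check_duplicate_detection (sheet_rows : List (List (List (String × String)))) (out : Bool × String) : Prop := out = check_duplicate_detection_alt sheet_rows
instance (sheet_rows : List (List (List (String × String)))) (out : Bool × String) : Decidable (Spec_check_duplicate_detection sheet_rows out) := by unfold Spec_check_duplicate_detection; infer_instance

-- ===== CLAIM (what is proved, stated in full; the proofs are below) =====
def Claim_equal_check_duplicate_detection : Prop := ∀ (sheet_rows : List (List (List (String × String)))), Dom_check_duplicate_detection sheet_rows → Spec_check_duplicate_detection sheet_rows (check_duplicate_detection sheet_rows)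

-- ===== LEMMAS AND PROOFS =====

-- the per-cell tests both programs perform
def cCell (cell : List (String × String)) : Bool :=
  PySem.Str.isIn "COUNTIF" (PySem.Str.upper (PySem.Dict.getD ⟨cell⟩ "formula" ""))

def fCell (cell : List (String × String)) : Option String :=
  let value := PySem.Str.upper (PySem.Dict.getD ⟨cell⟩ "value" "")
  if ["DUPLICATE", "DUP", "⚠", "WARNING"].any (fun ind => PySem.Str.isIn ind value)
  then some value else none

lemma ffir_fst (row : List (List (String × String))) :
    (find_formulas_in_row row ["COUNTIF"]).1 = row.any cCell := by
  induction row with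
  | nil => rfl
  | cons cell rest ih =>
    rw [find_formulas_in_row, List.any_cons]
    by_cases h : PySem.Dict.getD ⟨cell⟩ "formula" "" = ""
    · have hfalse : cCell cell = false := by
        unfold cCell; rw [h]; decide
      simp only [if_pos h, hfalse, Bool.false_or, ih]
    · rw [if_neg h]
      cases hc : cCell cell with
      | true =>
        simp_all [List.find?, cCell,
          show PySem.Chars.upper ['C', 'O', 'U', 'N', 'T', 'I', 'F'] = ['C', 'O', 'U', 'N', 'T', 'I', 'F'] from by decide]
      | false =>
        simp_all [List.find?, cCell,
          show PySem.Chars.upper ['C', 'O', 'U', 'N', 'T', 'I', 'F'] = ['C', 'O', 'U', 'N', 'T', 'I', 'F'] from by decide]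

lemma ffis_fst (sheet_rows : List (List (List (String × String)))) :
    (find_formulas_in_sheet sheet_rows ["COUNTIF"] 25).1
      = (PySem.List.slice sheet_rows none (some 25)).any (fun row => row.any cCell) := by
  unfold find_formulas_in_sheet
  rw [PySem.List.foldl_append_if (f := fun row => (find_formulas_in_row row ["COUNTIF"]).2)
        (p := fun row => (find_formulas_in_row row ["COUNTIF"]).1)]
  rw [Bool.eq_iff_iff]
  simp only [List.nil_append, decide_eq_true_eq, gt_iff_lt, List.length_pos_iff, ne_eq,
    List.map_eq_nil_iff, List.filter_eq_nil_iff, List.any_eq_true, ffir_fst, not_forall]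
  constructor
  · rintro ⟨row, hmem, hp⟩
    exact ⟨row, hmem, by simpa using hp⟩
  · rintro ⟨row, hmem, hp⟩
    exact ⟨row, hmem, by simpa using hp⟩

-- one step of B's fold, characterised
lemma cellStep (st : Bool × Option String) (cell : List (String × String)) :
    bStep st cell
    = (st.1 || cCell cell, match st.2 with | some v => some v | none => fCell cell) := by
  obtain ⟨b, o⟩ := st
  unfold bStep cCell fCell
  cases hc : PySem.Str.isIn "COUNTIF" (PySem.Str.upper (PySem.Dict.getD ⟨cell⟩ "formula" "")) with
  | true =>
    cases o with
    | some v => simp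
    | none =>
      cases hA : ["DUPLICATE", "DUP", "⚠", "WARNING"].any
          (fun ind => PySem.Str.isIn ind (PySem.Str.upper (PySem.Dict.getD ⟨cell⟩ "value" ""))) with
      | true => simp only [hA]; simp
      | false => simp only [hA]; simp
  | false =>
    cases o with
    | some v => simp
    | none =>
      cases hA : ["DUPLICATE", "DUP", "⚠", "WARNING"].any
          (fun ind => PySem.Str.isIn ind (PySem.Str.upper (PySem.Dict.getD ⟨cell⟩ "value" ""))) with
      | true => simp only [hA]; simp
      | false => simp only [hA]; simp

-- B's inner row fold, characterised
lemma rowFold (row : List (List (String × String))) (b : Bool) (o : Option String) :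
    bRow (b, o) row
    = (b || row.any cCell, match o with | some v => some v | none => row.findSome? fCell) := by
  induction row generalizing b o with
  | nil => cases o <;> simp [bRow]
  | cons cell rest ih =>
    rw [bRow, List.foldl_cons, cellStep, List.any_cons, List.findSome?_cons]
    rw [show List.foldl bStep _ rest = bRow _ rest from rfl]
    cases o with
    | some v => simp only [ih, Bool.or_assoc]
    | none =>
      cases hf : fCell cell with
      | some v => simp only [ih, Bool.or_assoc]
      | none => simp only [ih, Bool.or_assoc]

-- B's outer fold, characterised
lemma sheetFold (rows : List (List (List (String × String)))) (b : Bool) (o : Option String) :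
    rows.foldl bRow (b, o)
    = (b || rows.any (fun row => row.any cCell),
       match o with | some v => some v | none => rows.findSome? (fun row => row.findSome? fCell)) := by
  induction rows generalizing b o with
  | nil => cases o <;> simp
  | cons row rest ih =>
    rw [List.foldl_cons, rowFold, List.any_cons, List.findSome?_cons]
    cases o with
    | some v => simp only [ih, Bool.or_assoc]
    | none =>
      cases hf : row.findSome? fCell with
      | some v => simp only [ih, Bool.or_assoc]
      | none => simp only [ih, Bool.or_assoc]

-- ===== VERDICT (by name: the statement is the Claim_ definition above) =====
theorem check_duplicate_detection_spec : Claim_equal_check_duplicate_detection := by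
  intro sheet_rows _
  unfold Spec_check_duplicate_detection check_duplicate_detection check_duplicate_detection_alt
  rw [sheetFold]
  simp only [ffis_fst, Bool.false_or,
    show (fun cell : List (String × String) =>
      let value := PySem.Str.upper (PySem.Dict.getD ⟨cell⟩ "value" "")
      if ["DUPLICATE", "DUP", "⚠", "WARNING"].any (fun indicator => PySem.Str.isIn indicator value)
      then some value else none) = fCell from rfl]
  cases h : (PySem.List.slice sheet_rows none (some 25)).any (fun row => row.any cCell) with
  | false => simp
  | true =>
    cases List.findSome? (fun row => List.findSome? fCell row)
        (PySem.List.slice sheet_rows none (some 25)) with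
    | some v => simp
    | none => simp
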